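-- pv_equiv track=rewrite | github.com/enix403/dotfiles | shared/vscode/keybinds-gen/generate.py | resolve_for_os
-- ===== SOURCE A (Python) =====
-- MODIFIER_MAP = {
--     "macos": {"mod": "cmd",  "super": "alt",  "win": "alt"},
--     "linux": {"mod": "ctrl", "super": "meta", "win": "meta"},
-- }
--
-- MODIFIER_ORDER = ["ctrl", "shift", "alt", "cmd", "meta"]
--
-- def resolve_for_os(chord_sequence: str, target_os: str) -> str:
--     """Rewrite canonical modifiers (mod/super/win) to OS-specific ones."""
--     mapping = MODIFIER_MAP[target_os]
--     out_chords = []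
--     for chord in chord_sequence.split():
--         parts = chord.split("+")
--         if not parts:
--             continue
--         mods, main = parts[:-1], parts[-1]
--         resolved_mods = []
--         for m in mods:
--             m_lc = m.lower()
--             resolved_mods.append(mapping.get(m_lc, m_lc))
--         # Dedupe while keeping a stable order, then sort by MODIFIER_ORDER.
--         seen = set()
--         uniq = []
--         for m in resolved_mods:
--             if m not in seen:
--                 seen.add(m)
--                 uniq.append(m)
--         uniq.sort(key=lambda m: MODIFIER_ORDER.index(m) if m in MODIFIER_ORDER else 99)
--         out_chords.append("+".join([*uniq, main.lower()]))
--     return " ".join(out_chords)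
-- ===== SOURCE B (Python) =====
-- MODIFIER_MAP = {
--     "macos": {"mod": "cmd",  "super": "alt",  "win": "alt"},
--     "linux": {"mod": "ctrl", "super": "meta", "win": "meta"},
-- }
--
-- MODIFIER_ORDER = ["ctrl", "shift", "alt", "cmd", "meta"]
--
--
-- def _resolve_chord(chord, mapping):
--     *mods, main = chord.split("+")
--     resolved = [mapping.get(m.lower(), m.lower()) for m in mods]
--     modset = set(resolved)
--     ordered = [m for m in MODIFIER_ORDER if m in modset]
--     extras = [m for m in dict.fromkeys(resolved) if m not in MODIFIER_ORDER]
--     return "+".join(ordered + extras + [main.lower()])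
--
--
-- def resolve_for_os(chord_sequence: str, target_os: str) -> str:
--     """Rewrite canonical modifiers (mod/super/win) to OS-specific ones."""
--     mapping = MODIFIER_MAP[target_os]
--     return " ".join(_resolve_chord(c, mapping) for c in chord_sequence.split())
-- ===== Notes on version B (the rewrite author's own statement) =====
-- stated objective: simpler
-- what changed: Per chord, B replaces A's seen-set dedup loop plus stable sort with an index-or-99 key by a single scan of the fixed MODIFIER_ORDER table (known modifiers emitted in table order via a membership set) followed by the first-seen deduped unknown modifiers; the whole function becomes a per-chord helper mapped over the words. Pre_ excludes only target_os values outside MODIFIER_MAP, on which A raises KeyError (B raises it too).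
import Mathlib
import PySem

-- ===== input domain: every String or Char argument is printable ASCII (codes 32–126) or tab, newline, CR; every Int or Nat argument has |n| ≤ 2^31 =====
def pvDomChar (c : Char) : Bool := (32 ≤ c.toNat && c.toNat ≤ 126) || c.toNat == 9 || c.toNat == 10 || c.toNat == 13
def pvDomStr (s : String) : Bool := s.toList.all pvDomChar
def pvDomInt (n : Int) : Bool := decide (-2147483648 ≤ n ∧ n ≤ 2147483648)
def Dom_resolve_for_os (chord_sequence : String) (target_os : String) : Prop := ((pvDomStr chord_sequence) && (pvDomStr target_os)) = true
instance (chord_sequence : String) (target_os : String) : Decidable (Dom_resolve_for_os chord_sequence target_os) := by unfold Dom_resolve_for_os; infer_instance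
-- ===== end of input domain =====

-- B replaces A's per-chord seen-set dedup loop + stable sort (index-or-99 key) by one scan of the
-- fixed MODIFIER_ORDER table followed by the first-seen deduped unknown modifiers (objective: simpler).

-- ===== PORT A =====
def MODIFIER_MAP : PySem.Dict String (PySem.Dict String String) :=
  PySem.Dict.mk [("macos", PySem.Dict.mk [("mod","cmd"),("super","alt"),("win","alt")]),
                 ("linux", PySem.Dict.mk [("mod","ctrl"),("super","meta"),("win","meta")])]

def MODIFIER_ORDER : List String := ["ctrl", "shift", "alt", "cmd", "meta"]

-- A's sort key: MODIFIER_ORDER.index(m) if m in MODIFIER_ORDER else 99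
def pvKeyA (m : String) : Int :=
  match PySem.List.index? MODIFIER_ORDER m with
  | some i => (i : Int)
  | none => 99

-- the body of A's 'for chord in chord_sequence.split()' loop
def pvBodyA (mapping : PySem.Dict String String) (out_chords : List String) (chord : String) : List String :=
  match PySem.Str.split? chord "+" with
  | none => out_chords        -- unreachable: the separator "+" is non-empty
  | some parts =>
    if parts = [] then out_chords          -- 'if not parts: continue'
    else
      let mods := PySem.List.slice parts none (some (-1))     -- parts[:-1]
      match PySem.List.pyGet? parts (-1) with                 -- parts[-1]
      | none => out_chords    -- unreachable: parts is non-empty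
      | some main =>
        let resolved_mods := mods.foldl (fun acc m =>
          let m_lc := PySem.Str.lower m
          acc ++ [PySem.Dict.getD mapping m_lc m_lc]) []
        let su := resolved_mods.foldl
          (fun (st : PySem.Set String × List String) m =>
            if st.1.contains m then st else (st.1.add m, st.2 ++ [m]))
          (PySem.Set.empty, [])
        let uniq := PySem.List.sorted su.2 pvKeyA
        out_chords ++ [PySem.Str.join "+" (uniq ++ [PySem.Str.lower main])]

def resolve_for_os (chord_sequence : String) (target_os : String) : String :=
  match PySem.Dict.get? MODIFIER_MAP target_os with
  | none => ""                -- MODIFIER_MAP[target_os] raises KeyError: excluded by Pre_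
  | some mapping =>
    PySem.Str.join " " ((PySem.Str.split₀ chord_sequence).foldl (pvBodyA mapping) [])

-- ===== PORT B =====
def pvResolveChord (chord : String) (mapping : PySem.Dict String String) : String :=
  let parts := (PySem.Str.split? chord "+").getD []   -- chord.split("+"); "+" ≠ "" so always some
  let mods := parts.dropLast                          -- *mods, main = parts  (parts is never empty)
  let main := parts.getLastD ""
  let resolved := mods.map (fun m => let l := PySem.Str.lower m; PySem.Dict.getD mapping l l)
  let modset := PySem.Set.ofList resolved
  let ordered := MODIFIER_ORDER.filter (fun m => modset.contains m)
  let extras := (PySem.List.dedup resolved).filter (fun m => !(MODIFIER_ORDER.contains m))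
  PySem.Str.join "+" (ordered ++ extras ++ [PySem.Str.lower main])

def resolve_for_os_alt (chord_sequence : String) (target_os : String) : String :=
  match PySem.Dict.get? MODIFIER_MAP target_os with
  | none => ""
  | some mapping =>
    PySem.Str.join " " ((PySem.Str.split₀ chord_sequence).map (fun c => pvResolveChord c mapping))

-- ===== PRECONDITION & SPEC =====
-- Pre_ excludes exactly the target_os values outside MODIFIER_MAP, on which the Python A raises KeyError.
def Pre_resolve_for_os (chord_sequence : String) (target_os : String) : Prop :=
  target_os = "macos" ∨ target_os = "linux"
instance (chord_sequence : String) (target_os : String) : Decidable (Pre_resolve_for_os chord_sequence target_os) := by unfold Pre_resolve_for_os; infer_instance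

def pvWitness_resolve_for_os : String × String := ("ctrl+shift+p mod+K", "macos")

def Spec_resolve_for_os (chord_sequence : String) (target_os : String) (out : String) : Prop := out = resolve_for_os_alt chord_sequence target_os
instance (chord_sequence : String) (target_os : String) (out : String) : Decidable (Spec_resolve_for_os chord_sequence target_os out) := by unfold Spec_resolve_for_os; infer_instance

-- ===== CLAIM (what is proved, stated in full; the proofs are below) =====
def Claim_equal_resolve_for_os : Prop := ∀ (chord_sequence : String) (target_os : String), Dom_resolve_for_os chord_sequence target_os → Pre_resolve_for_os chord_sequence target_os → Spec_resolve_for_os chord_sequence target_os (resolve_for_os chord_sequence target_os)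

-- ===== LEMMAS AND PROOFS =====

-- B's per-chord output, as a function of the (already deduped) resolved-modifier list
def pvShape (p : List String) : List String :=
  MODIFIER_ORDER.filter (fun m => p.contains m) ++ p.filter (fun m => !(MODIFIER_ORDER.contains m))

theorem pvKeyA_of_not_mem (m : String) (h : m ∉ MODIFIER_ORDER) : pvKeyA m = 99 := by
  have h' : List.idxOf? m MODIFIER_ORDER = none := by
    simpa using h
  simp [pvKeyA, PySem.List.index?_eq_idxOf?, h']

theorem pvKeyA_lt_of_mem (m : String) (h : m ∈ MODIFIER_ORDER) : pvKeyA m < 99 := by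
  fin_cases h <;> decide

theorem pvKeyA_le (m : String) : pvKeyA m ≤ 99 := by
  by_cases h : m ∈ MODIFIER_ORDER
  · exact le_of_lt (pvKeyA_lt_of_mem m h)
  · rw [pvKeyA_of_not_mem m h]

theorem pvInsertBy_cons (f : String → String → Bool) (x y : String) (ys : List String) :
    PySem.List.insertBy f x (y :: ys) = if f x y then x :: y :: ys else y :: PySem.List.insertBy f x ys := by
  simp [PySem.List.insertBy]

theorem pvIns_all (x : String) (l : List String) (h : ∀ z ∈ l, pvKeyA x < pvKeyA z) :
    PySem.List.insertBy (fun a b => decide (pvKeyA a < pvKeyA b)) x l = x :: l := by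
  cases l with
  | nil => simp [PySem.List.insertBy]
  | cons z zs =>
    rw [pvInsertBy_cons]
    simp [h z (List.mem_cons_self ..)]

theorem pvIns_known : ∀ (os : List String), os.Pairwise (fun a b => pvKeyA a < pvKeyA b) →
    ∀ (x : String) (p ws : List String), x ∈ os → x ∉ p → (∀ w ∈ ws, pvKeyA x < pvKeyA w) →
    PySem.List.insertBy (fun a b => decide (pvKeyA a < pvKeyA b)) x
        (os.filter (fun m => p.contains m) ++ ws)
      = os.filter (fun m => (p ++ [x]).contains m) ++ ws := by
  intro os
  induction os with
  | nil => intro _ x p ws hx; exact absurd hx (List.not_mem_nil)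
  | cons y os' ih =>
    intro hpw x p ws hx hxp hws
    have hy : ∀ b ∈ os', pvKeyA y < pvKeyA b := (List.pairwise_cons.mp hpw).1
    have hpw' := (List.pairwise_cons.mp hpw).2
    by_cases hyx : y = x
    · subst hyx
      have hxc : p.contains y = false := by simpa using hxp
      have hxc' : (p ++ [y]).contains y = true := by simp
      rw [List.filter_cons, List.filter_cons]
      simp only [hxc, hxc', if_pos, if_neg, Bool.false_eq_true, reduceIte]
      rw [pvIns_all]
      · have : os'.filter (fun m => (p ++ [y]).contains m) = os'.filter (fun m => p.contains m) := by
          apply List.filter_congr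
          intro z hz
          have hzy : z ≠ y := by
            intro hzy; subst hzy; exact lt_irrefl _ (hy z hz)
          simp [hzy]
        rw [this, List.cons_append]
      · intro z hz
        rcases List.mem_append.mp hz with hz1 | hz2
        · exact hy z (List.mem_of_mem_filter hz1)
        · exact hws z hz2
    · have hx' : x ∈ os' := by
        rcases List.mem_cons.mp hx with h | h
        · exact absurd h.symm hyx
        · exact h
      have hkey : pvKeyA y < pvKeyA x := hy x hx'
      have hbefore : decide (pvKeyA x < pvKeyA y) = false := by
        simp; omega
      by_cases hyp : y ∈ p
      · have h1 : p.contains y = true := by simpa using hyp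
        have h2 : (p ++ [x]).contains y = true := by simp [List.contains_iff]; left; exact hyp
        rw [List.filter_cons, List.filter_cons]
        simp only [h1, h2, if_pos]
        rw [List.cons_append, pvInsertBy_cons, hbefore]
        simp only [Bool.false_eq_true, reduceIte]
        rw [ih hpw' x p ws hx' hxp hws, List.cons_append]
      · have h1 : p.contains y = false := by simpa using hyp
        have h2 : (p ++ [x]).contains y = false := by
          simp
          exact ⟨hyp, fun h => hyx h⟩
        rw [List.filter_cons, List.filter_cons]
        simp only [h1, h2, Bool.false_eq_true, reduceIte]
        exact ih hpw' x p ws hx' hxp hws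

theorem pvStep (x : String) (p : List String) (hx : x ∉ p) :
    PySem.List.insertBy (fun a b => decide (pvKeyA a < pvKeyA b)) x (pvShape p) = pvShape (p ++ [x]) := by
  by_cases hmem : x ∈ MODIFIER_ORDER
  · unfold pvShape
    have hws : ∀ w ∈ p.filter (fun m => !(MODIFIER_ORDER.contains m)), pvKeyA x < pvKeyA w := by
      intro w hw
      have hwn : w ∉ MODIFIER_ORDER := by
        have := List.of_mem_filter hw
        simpa using this
      rw [pvKeyA_of_not_mem w hwn]
      exact pvKeyA_lt_of_mem x hmem
    rw [pvIns_known MODIFIER_ORDER (by decide) x p _ hmem hx hws]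
    congr 1
    rw [List.filter_append, List.filter_cons]
    simp [hmem]
  · have hall : ∀ y ∈ pvShape p, (fun a b => decide (pvKeyA a < pvKeyA b)) x y = false := by
      intro y _
      have h99 : pvKeyA x = 99 := pvKeyA_of_not_mem x hmem
      have := pvKeyA_le y
      simp [h99]; omega
    rw [PySem.List.insertBy_of_forall_not_before _ _ _ hall]
    unfold pvShape
    rw [List.filter_append, List.filter_cons]
    have hcx : (!(MODIFIER_ORDER.contains x)) = true := by simpa using hmem
    have hfo : MODIFIER_ORDER.filter (fun m => (p ++ [x]).contains m)
             = MODIFIER_ORDER.filter (fun m => p.contains m) := by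
      apply List.filter_congr
      intro z hz
      have hzx : z ≠ x := fun h => hmem (h ▸ hz)
      simp [hzx]
    rw [hfo]
    simp [hmem]

theorem pvSortLoop : ∀ (u p : List String), (p ++ u).Nodup →
    u.foldl (fun acc x => PySem.List.insertBy (fun a b => decide (pvKeyA a < pvKeyA b)) x acc) (pvShape p)
      = pvShape (p ++ u) := by
  intro u
  induction u with
  | nil => intro p _; simp
  | cons x u' ih =>
    intro p hnd
    have hxp : x ∉ p := by
      have := hnd
      rw [List.nodup_middle] at this
      intro hmem
      exact (List.nodup_cons.mp this).1 (List.mem_append.mpr (Or.inl hmem))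
    have hnd' : ((p ++ [x]) ++ u').Nodup := by
      rw [List.append_assoc]; simpa using hnd
    rw [List.foldl_cons, pvStep x p hxp, ih (p ++ [x]) hnd']
    simp

theorem pvSorted_eq (u : List String) (h : u.Nodup) :
    PySem.List.sorted u pvKeyA = pvShape u := by
  rw [PySem.List.sorted_eq_foldl_insertBy]
  have := pvSortLoop u [] (by simpa using h)
  rw [show pvShape ([] : List String) = [] from rfl] at this
  simpa using this

theorem pvDedupLoop : ∀ (l : List String) (s : PySem.Set String),
    l.foldl (fun (st : PySem.Set String × List String) m =>
        if st.1.contains m then st else (st.1.add m, st.2 ++ [m])) (s, s)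
      = (l.foldl PySem.Set.add s, l.foldl PySem.Set.add s) := by
  intro l
  induction l with
  | nil => intro s; rfl
  | cons m l' ih =>
    intro s
    by_cases hm : m ∈ s
    · have hc : s.contains m = true := List.contains_iff_mem.mpr hm
      have hadd : PySem.Set.add s m = s := by simp [PySem.Set.add, hm]
      simp only [List.foldl_cons, hc, if_pos, hadd]
      exact ih s
    · have hc : s.contains m = false := by
        rw [Bool.eq_false_iff]
        intro h
        exact hm (List.contains_iff_mem.mp h)
      have hadd : PySem.Set.add s m = s ++ [m] := by simp [PySem.Set.add, hm]
      simp only [List.foldl_cons, hc, Bool.false_eq_true, reduceIte, hadd]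
      exact ih (s ++ [m])

theorem pvPushMap {α β : Type} : ∀ (l : List α) (f : α → β) (acc : List β),
    l.foldl (fun a m => a ++ [f m]) acc = acc ++ l.map f := by
  intro l
  induction l with
  | nil => intro f acc; simp
  | cons x l' ih => intro f acc; simp [ih]

theorem pvGo_ne_nil (sep : List Char) :
    ∀ (fuel : Nat) (l cur : List Char) (acc : List (List Char)),
      PySem.Chars.splitOn.go sep fuel l cur acc ≠ [] := by
  intro fuel
  induction fuel with
  | zero =>
    intro l cur acc
    simp [PySem.Chars.splitOn.go]
  | succ fuel ih =>
    intro l cur acc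
    cases l with
    | nil => simp [PySem.Chars.splitOn.go]
    | cons c rest =>
      simp only [PySem.Chars.splitOn.go]
      split
      · exact ih _ _ _
      · exact ih _ _ _

theorem pvSplitPlus_ne_nil (chord : String) :
    ∃ parts, PySem.Str.split? chord "+" = some parts ∧ parts ≠ [] := by
  refine ⟨(PySem.Chars.splitOn chord.toList ['+']).map String.ofList, ?_, ?_⟩
  · simp [PySem.Str.split?, PySem.Chars.split?]
  · intro h
    exact pvGo_ne_nil ['+'] _ _ _ _ (List.map_eq_nil_iff.mp h)

theorem pvSliceNegOne {α : Type} (xs : List α) :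
    PySem.List.slice xs none (some (-1)) = xs.dropLast := by
  cases xs with
  | nil => rfl
  | cons x xs' =>
    simp only [PySem.List.slice, PySem.List.clampIdx]
    rw [if_pos (by norm_num), if_neg (by push_cast [List.length_cons]; omega)]
    rw [List.drop_zero, List.dropLast_eq_take]
    congr 1
    push_cast [List.length_cons]
    omega

theorem pvGetNegOne (q : String) (qs : List String) :
    PySem.List.pyGet? (q :: qs) (-1) = some ((q :: qs).getLastD "") := by
  have hidx : PySem.List.pyIdx? (q :: qs).length (-1) = some ((q :: qs).length - 1) := by
    unfold PySem.List.pyIdx?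
    rw [if_neg (by norm_num), if_pos (by push_cast [List.length_cons]; omega)]
    norm_num
  have h1 : (q :: qs).getLast? = some ((q :: qs).getLastD "") := by
    cases h : (q :: qs).getLast? with
    | none => simp at h
    | some v => simp [List.getLastD_eq_getLast?, h]
  simp only [PySem.List.pyGet?, hidx, Option.bind_some]
  rw [← List.getLast?_eq_getElem?, h1]

theorem pvChord (mapping : PySem.Dict String String) (acc : List String) (chord : String) :
    pvBodyA mapping acc chord = acc ++ [pvResolveChord chord mapping] := by
  obtain ⟨parts, hps, hne⟩ := pvSplitPlus_ne_nil chord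
  obtain ⟨q, qs, rfl⟩ := List.exists_cons_of_ne_nil hne
  unfold pvBodyA pvResolveChord
  rw [hps]
  simp only [reduceCtorEq, if_false, Option.getD_some]
  rw [pvSliceNegOne, pvGetNegOne]
  rw [pvPushMap]
  simp only [List.nil_append]
  rw [show ((PySem.Set.empty : PySem.Set String), ([] : List String))
        = ((PySem.Set.empty : PySem.Set String), (PySem.Set.empty : PySem.Set String)) from rfl]
  rw [pvDedupLoop _ PySem.Set.empty]
  rw [pvSorted_eq _ (by
    have := PySem.Set.nodup_ofList
      ((q :: qs).dropLast.map (fun m => PySem.Dict.getD mapping (PySem.Str.lower m) (PySem.Str.lower m)))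
    simpa [PySem.Set.ofList] using this)]
  rw [PySem.List.dedup_eq_ofList]
  unfold pvShape
  simp [PySem.Set.ofList, List.append_assoc]

theorem pvOuter (mapping : PySem.Dict String String) :
    ∀ (ws : List String) (acc : List String),
      ws.foldl (pvBodyA mapping) acc = acc ++ ws.map (fun c => pvResolveChord c mapping) := by
  intro ws
  induction ws with
  | nil => intro acc; simp
  | cons c ws' ih =>
    intro acc
    rw [List.foldl_cons, pvChord, ih]
    simp

-- ===== VERDICT (by name: the statement is the Claim_ definition above) =====
theorem resolve_for_os_spec : Claim_equal_resolve_for_os := by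
  intro cs tos _ _
  unfold Spec_resolve_for_os resolve_for_os resolve_for_os_alt
  cases hm : PySem.Dict.get? MODIFIER_MAP tos with
  | none => rfl
  | some mapping =>
    show PySem.Str.join " " ((PySem.Str.split₀ cs).foldl (pvBodyA mapping) [])
       = PySem.Str.join " " ((PySem.Str.split₀ cs).map (fun c => pvResolveChord c mapping))
    rw [pvOuter mapping (PySem.Str.split₀ cs) []]
    simp
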